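-- pv_equiv track=rewrite | github.com/dkleeqc/QuantAnneal_CodonOpt | codon_optimization.py | _get_synonymous_codons
-- ===== SOURCE A (Python) =====
-- def _get_synonymous_codons(genetic_code_dict):
--
--     # invert the genetic code dictionary to map each amino acid to its codons
--     codons_for_amino_acid = {}
--     for codon, amino_acid in genetic_code_dict.items():
--         codons_for_amino_acid[amino_acid] = codons_for_amino_acid.get(amino_acid, [])
--         codons_for_amino_acid[amino_acid].append(codon)
--
--     # create dictionary of synonymous codons
--     # Example: {'CTT': ['CTT', 'CTG', 'CTA', 'CTC', 'TTA', 'TTG'], 'ATG': ['ATG']...}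
--     return {
--         codon: codons_for_amino_acid[genetic_code_dict[codon]]
--         for codon in genetic_code_dict.keys()
--     }
-- ===== SOURCE B (Python) =====
-- def _get_synonymous_codons(genetic_code_dict):
--     # one nested scan: for each codon, collect every codon coding the same amino acid
--     return {
--         codon: [c for c, a in genetic_code_dict.items() if a == amino]
--         for codon, amino in genetic_code_dict.items()
--     }
-- ===== Notes on version B (the rewrite author's own statement) =====
-- stated objective: simpler
-- what changed: B drops A's intermediate amino-acid->codons inverted dict and builds each codon's synonymous list by a direct scan of the genetic code, a nested comprehension with no auxiliary index.
import Mathlib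
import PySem

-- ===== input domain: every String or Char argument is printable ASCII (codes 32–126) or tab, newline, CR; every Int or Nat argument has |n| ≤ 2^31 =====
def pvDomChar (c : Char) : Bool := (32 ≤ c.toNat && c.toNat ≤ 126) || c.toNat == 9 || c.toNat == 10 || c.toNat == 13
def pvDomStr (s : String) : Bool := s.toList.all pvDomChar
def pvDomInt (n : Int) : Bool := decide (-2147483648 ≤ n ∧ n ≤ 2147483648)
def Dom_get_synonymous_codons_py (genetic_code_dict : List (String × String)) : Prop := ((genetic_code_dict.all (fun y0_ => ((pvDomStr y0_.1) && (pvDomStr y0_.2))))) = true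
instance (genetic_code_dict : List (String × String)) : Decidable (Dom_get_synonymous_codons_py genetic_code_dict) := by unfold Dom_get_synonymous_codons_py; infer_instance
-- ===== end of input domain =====

-- B replaces A's inverted amino-acid→codons index with a direct nested scan; equivalence is about
-- returned VALUES (A aliases one list object among synonymous codons, B builds equal fresh lists).

-- ===== PORT A =====
-- invert the genetic code dict (d[aa] = d.get(aa, []); d[aa].append(codon)), then map each codon
-- to the inverted dict's entry for its amino acid.
def get_synonymous_codons_py (genetic_code_dict : List (String × String)) : List (String × List String) :=
  let codons_for_amino_acid : PySem.Dict String (List String) :=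
    genetic_code_dict.foldl (fun d p => d.modify p.2 [] (· ++ [p.1])) PySem.Dict.empty
  genetic_code_dict.map (fun p =>
    (p.1, codons_for_amino_acid.getD ((PySem.Dict.mk genetic_code_dict).getD p.1 "") []))

-- ===== PORT B =====
def get_synonymous_codons_py_alt (genetic_code_dict : List (String × String)) : List (String × List String) :=
  genetic_code_dict.map (fun p =>
    (p.1, (genetic_code_dict.filter (fun q => q.2 == p.2)).map Prod.fst))

-- ===== PRECONDITION & SPEC =====
-- A Python dict cannot carry duplicate keys; association lists with a repeated key encode no dict
-- input, so they are excluded.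
def Pre_get_synonymous_codons_py (genetic_code_dict : List (String × String)) : Prop :=
  (genetic_code_dict.map Prod.fst).Nodup
instance (genetic_code_dict : List (String × String)) : Decidable (Pre_get_synonymous_codons_py genetic_code_dict) := by unfold Pre_get_synonymous_codons_py; infer_instance
def pvWitness_get_synonymous_codons_py : (List (String × String)) :=
  [("CTT", "L"), ("CTG", "L"), ("ATG", "M"), ("TTA", "L")]
def Spec_get_synonymous_codons_py (genetic_code_dict : List (String × String)) (out : List (String × List String)) : Prop := out = get_synonymous_codons_py_alt genetic_code_dict
instance (genetic_code_dict : List (String × String)) (out : List (String × List String)) : Decidable (Spec_get_synonymous_codons_py genetic_code_dict out) := by unfold Spec_get_synonymous_codons_py; infer_instance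

-- ===== CLAIM (what is proved, stated in full; the proofs are below) =====
def Claim_equal_get_synonymous_codons_py : Prop := ∀ (genetic_code_dict : List (String × String)), Dom_get_synonymous_codons_py genetic_code_dict → Pre_get_synonymous_codons_py genetic_code_dict → Spec_get_synonymous_codons_py genetic_code_dict (get_synonymous_codons_py genetic_code_dict)

-- ===== LEMMAS AND PROOFS =====

-- the inverted-index fold groups codons by amino acid, in genetic-code order
theorem grp_getD (l : List (String × String)) (d : PySem.Dict String (List String)) (a : String) :
    (l.foldl (fun d p => d.modify p.2 [] (· ++ [p.1])) d).getD a []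
      = d.getD a [] ++ (l.filter (fun q => q.2 == a)).map Prod.fst := by
  induction l generalizing d with
  | nil => simp
  | cons p t ih =>
    simp only [List.foldl_cons, ih, List.filter_cons]
    rw [PySem.Dict.getD_modify]
    by_cases h : a = p.2
    · simp [h]
    · have h2 : ¬ p.2 = a := fun hh => h hh.symm
      simp [h, h2]

-- first-match lookup on a duplicate-free assoc list returns the paired value
theorem lookup_mem (l : List (String × String)) (p : String × String)
    (hnd : (l.map Prod.fst).Nodup) (hm : p ∈ l) :
    (PySem.Dict.mk l).getD p.1 "" = p.2 := by
  induction l with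
  | nil => cases hm
  | cons q t ih =>
    simp only [List.map_cons, List.nodup_cons] at hnd
    rw [PySem.Dict.getD_eq_get?_getD, PySem.Dict.get?_mk_cons]
    rcases List.mem_cons.mp hm with hm | hm
    · subst hm; simp
    · have hne : q.1 ≠ p.1 := by
        intro h; exact hnd.1 (h ▸ List.mem_map_of_mem hm)
      simp only [beq_iff_eq, if_neg hne]
      rw [← PySem.Dict.getD_eq_get?_getD]
      exact ih hnd.2 hm

-- ===== VERDICT (by name: the statement is the Claim_ definition above) =====
theorem get_synonymous_codons_py_spec : Claim_equal_get_synonymous_codons_py := by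
  intro g _ hpre
  show get_synonymous_codons_py g = get_synonymous_codons_py_alt g
  unfold get_synonymous_codons_py get_synonymous_codons_py_alt
  refine List.map_congr_left (fun p hp => ?_)
  rw [lookup_mem g p hpre hp, grp_getD]
  simp
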